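-- pv_equiv track=rewrite | github.com/tokamak-network/syb-mvp-notebook | diffusion_problem_test.py | generate_alphabetical_names
-- ===== SOURCE A (Python) =====
-- from typing import List, Dict, Tuple
--
-- def generate_alphabetical_names(n: int) -> List[str]:
--     names = [
--         "Alice", "Bob", "Charlie", "David", "Eve", "Frank", "Grace", "Henry",
--         "Ivy", "Jack", "Kate", "Leo", "Mia", "Noah", "Olivia", "Paul",
--         "Quinn", "Rachel", "Sam", "Tina", "Uma", "Victor", "Wendy", "Xavier",
--         "Yara", "Zoe",
--         "Aaron", "Bella", "Clara", "Dylan", "Eliza", "Finn", "Gina", "Hank",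
--         "Isabel", "Joel", "Kira", "Liam", "Mona", "Nate", "Opal", "Perry",
--         "Quincy", "Rosa", "Seth", "Tara", "Uri", "Vera", "Will", "Xena",
--         "Yosef", "Zara",
--         "Ava", "Ben", "Cara", "Derek", "Elsa", "Felix", "Gia", "Harvey",
--         "Ingrid", "Jade", "Kyle", "Leah", "Mason", "Nina", "Omar", "Paula",
--         "Queenie", "Rex", "Sara", "Trevor", "Ulric", "Violet", "Wade", "Ximena",
--         "Yvonne", "Zander",
--     ]
--     if n > len(names):
--         extended = []
--         for i in range(n):
--             if i < len(names):
--                 extended.append(names[i])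
--             else:
--                 base_idx = i % len(names)
--                 suffix = (i // len(names)) + 1
--                 extended.append(f"{names[base_idx]}{suffix}")
--         return extended[:n]
--     return names[:n]
-- ===== SOURCE B (Python) =====
-- def generate_alphabetical_names(n: int) -> list:
--     names = [
--         "Alice", "Bob", "Charlie", "David", "Eve", "Frank", "Grace", "Henry",
--         "Ivy", "Jack", "Kate", "Leo", "Mia", "Noah", "Olivia", "Paul",
--         "Quinn", "Rachel", "Sam", "Tina", "Uma", "Victor", "Wendy", "Xavier",
--         "Yara", "Zoe",
--         "Aaron", "Bella", "Clara", "Dylan", "Eliza", "Finn", "Gina", "Hank",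
--         "Isabel", "Joel", "Kira", "Liam", "Mona", "Nate", "Opal", "Perry",
--         "Quincy", "Rosa", "Seth", "Tara", "Uri", "Vera", "Will", "Xena",
--         "Yosef", "Zara",
--         "Ava", "Ben", "Cara", "Derek", "Elsa", "Felix", "Gia", "Harvey",
--         "Ingrid", "Jade", "Kyle", "Leah", "Mason", "Nina", "Omar", "Paula",
--         "Queenie", "Rex", "Sara", "Trevor", "Ulric", "Violet", "Wade", "Ximena",
--         "Yvonne", "Zander",
--     ]
--     if n <= len(names):
--         return names[:n]
--     result = list(names)
--     gen = 2
--     while len(result) < n: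
--         result.extend(f"{name}{gen}" for name in names)
--         gen += 1
--     return result[:n]
-- ===== Notes on version B (the rewrite author's own statement) =====
-- stated objective: alternative
-- what changed: Replaces the flat range(n) loop with per-index modulo/division arithmetic by a generational construction: copy the base table once, then append whole suffixed blocks (name + generation number, starting at the second generation) until the list is long enough, and truncate to n; no per-element division or modulo.
import Mathlib
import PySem

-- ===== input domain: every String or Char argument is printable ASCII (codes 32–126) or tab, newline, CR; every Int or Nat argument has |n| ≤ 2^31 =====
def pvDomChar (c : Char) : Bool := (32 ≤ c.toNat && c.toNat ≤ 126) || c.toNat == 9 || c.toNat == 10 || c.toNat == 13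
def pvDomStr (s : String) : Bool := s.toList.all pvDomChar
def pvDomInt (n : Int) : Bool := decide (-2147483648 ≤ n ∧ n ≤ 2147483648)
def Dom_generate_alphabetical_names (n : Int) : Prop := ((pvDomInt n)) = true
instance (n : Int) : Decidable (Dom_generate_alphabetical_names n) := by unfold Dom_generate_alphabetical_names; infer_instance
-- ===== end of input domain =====

-- B builds the list in generational blocks (copy the table, then append whole suffixed blocks
-- until long enough, truncate) instead of A's flat range(n) loop with i % len / i // len + 1
-- arithmetic per element; same cost, different decomposition.

-- the shared literal name table of both Pythons
def pvNames : List String := [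
  "Alice", "Bob", "Charlie", "David", "Eve", "Frank", "Grace", "Henry",
  "Ivy", "Jack", "Kate", "Leo", "Mia", "Noah", "Olivia", "Paul",
  "Quinn", "Rachel", "Sam", "Tina", "Uma", "Victor", "Wendy", "Xavier",
  "Yara", "Zoe",
  "Aaron", "Bella", "Clara", "Dylan", "Eliza", "Finn", "Gina", "Hank",
  "Isabel", "Joel", "Kira", "Liam", "Mona", "Nate", "Opal", "Perry",
  "Quincy", "Rosa", "Seth", "Tara", "Uri", "Vera", "Will", "Xena",
  "Yosef", "Zara",
  "Ava", "Ben", "Cara", "Derek", "Elsa", "Felix", "Gia", "Harvey",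
  "Ingrid", "Jade", "Kyle", "Leah", "Mason", "Nina", "Omar", "Paula",
  "Queenie", "Rex", "Sara", "Trevor", "Ulric", "Violet", "Wade", "Ximena",
  "Yvonne", "Zander"]

-- ===== PORT A =====
-- names[i] / names[base_idx]: both indices are always in range in A, so pyGetD is exact here;
-- the intermediates base_idx/suffix are inlined.
def generate_alphabetical_names (n : Int) : List String :=
  if n > (pvNames.length : Int) then
    PySem.List.slice
      ((PySem.List.pyRange 0 n 1).foldl (fun acc i =>
        if i < (pvNames.length : Int) then
          acc ++ [PySem.List.pyGetD pvNames i ""]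
        else
          acc ++ [PySem.List.pyGetD pvNames (PySem.Int.mod i (pvNames.length : Int)) "" ++
            PySem.Int.toStr (PySem.Int.floordiv i (pvNames.length : Int) + 1)]) [])
      none (some n)
  else
    PySem.List.slice pvNames none (some n)

-- ===== PORT B =====
-- the while loop of Source B; fuel n.toNat only makes it total (each pass appends 78 names)
def pvLoopB (fuel : Nat) (n : Int) (acc : List String) (gen : Int) : List String :=
  match fuel with
  | 0 => acc
  | fuel + 1 =>
    if (acc.length : Int) < n then
      pvLoopB fuel n (acc ++ pvNames.map (fun name => name ++ PySem.Int.toStr gen)) (gen + 1)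
    else acc

def generate_alphabetical_names_alt (n : Int) : List String :=
  if n ≤ (pvNames.length : Int) then
    PySem.List.slice pvNames none (some n)
  else
    PySem.List.slice (pvLoopB n.toNat n pvNames 2) none (some n)

-- ===== PRECONDITION & SPEC =====
def Spec_generate_alphabetical_names (n : Int) (out : List String) : Prop := out = generate_alphabetical_names_alt n
instance (n : Int) (out : List String) : Decidable (Spec_generate_alphabetical_names n out) := by unfold Spec_generate_alphabetical_names; infer_instance

-- ===== CLAIM (what is proved, stated in full; the proofs are below) =====
def Claim_equal_generate_alphabetical_names : Prop := ∀ (n : Int), Dom_generate_alphabetical_names n → Spec_generate_alphabetical_names n (generate_alphabetical_names n)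

-- ===== LEMMAS AND PROOFS =====

-- the element at flat position k, as A computes it
def pvG (k : Nat) : String :=
  if k < 78 then pvNames.getD k ""
  else pvNames.getD (k % 78) "" ++ PySem.Int.toStr (((k / 78 : Nat) : Int) + 1)

-- the first G generational blocks of B, concatenated
def pvBig : Nat → List String
  | 0 => []
  | G + 1 => pvBig G ++
      (if G = 0 then pvNames else pvNames.map (fun name => name ++ PySem.Int.toStr ((G : Int) + 1)))

theorem pvNames_length : pvNames.length = 78 := by decide

theorem pvBig_succ (G : Nat) : pvBig (G + 1) = pvBig G ++
    (if G = 0 then pvNames else pvNames.map (fun name => name ++ PySem.Int.toStr ((G : Int) + 1))) := rfl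

theorem pvBig_length (G : Nat) : (pvBig G).length = 78 * G := by
  induction G with
  | zero => rfl
  | succ G ih =>
    rw [pvBig_succ, List.length_append, ih]
    by_cases hG : G = 0
    · rw [if_pos hG, pvNames_length]; omega
    · rw [if_neg hG, List.length_map, pvNames_length]; omega

theorem pv_map_getD_range (xs : List String) (d : String) :
    (List.range xs.length).map (fun j => xs.getD j d) = xs := by
  apply List.ext_getElem (by simp)
  intro i h1 h2
  simp only [List.getElem_map, List.getElem_range]
  rw [List.getD_eq_getElem?_getD, List.getElem?_eq_getElem h2, Option.getD_some]

theorem pv_map_getD : (List.range 78).map (fun j => pvNames.getD j "") = pvNames := by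
  have := pv_map_getD_range pvNames ""
  rwa [pvNames_length] at this

theorem pv_block_eq (G : Nat) (hG : 1 ≤ G) :
    (List.range 78).map (fun j => pvG (78 * G + j)) =
      pvNames.map (fun name => name ++ PySem.Int.toStr ((G : Int) + 1)) := by
  have h : ∀ j ∈ List.range 78,
      pvG (78 * G + j) = pvNames.getD j "" ++ PySem.Int.toStr ((G : Int) + 1) := by
    intro j hj
    rw [List.mem_range] at hj
    unfold pvG
    have h1 : ¬ (78 * G + j < 78) := by omega
    have h2 : (78 * G + j) % 78 = j := by omega
    have h3 : (78 * G + j) / 78 = G := by omega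
    simp only [h1, if_false, h2, h3]
  rw [List.map_congr_left h]
  calc (List.range 78).map (fun j => pvNames.getD j "" ++ PySem.Int.toStr ((G : Int) + 1))
      = ((List.range 78).map (fun j => pvNames.getD j "")).map
          (fun s => s ++ PySem.Int.toStr ((G : Int) + 1)) := by rw [List.map_map]; rfl
    _ = pvNames.map (fun name => name ++ PySem.Int.toStr ((G : Int) + 1)) := by rw [pv_map_getD]

theorem pvBig_eq_map (G : Nat) : pvBig G = (List.range (78 * G)).map pvG := by
  induction G with
  | zero => rfl
  | succ G ih =>
    rw [show 78 * (G + 1) = 78 * G + 78 by ring, List.range_add, List.map_append, ← ih,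
      List.map_map, pvBig_succ]
    congr 1
    by_cases hG : G = 0
    · subst hG
      rw [if_pos rfl, ← pv_map_getD]
      apply List.map_congr_left
      intro j hj
      rw [List.mem_range] at hj
      simp only [Function.comp_apply]
      rw [show 78 * 0 + j = j by omega]
      unfold pvG
      rw [if_pos hj]
    · rw [if_neg hG, ← pv_block_eq G (by omega)]
      apply List.map_congr_left
      intro j _
      rfl

theorem pvLoopB_spec (fuel : Nat) : ∀ (G : Nat) (n : Int), 1 ≤ G → n ≤ 78 * G + 78 * fuel →
    ∃ G' : Nat, 1 ≤ G' ∧ n ≤ 78 * G' ∧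
      pvLoopB fuel n (pvBig G) ((G : Int) + 1) = pvBig G' := by
  induction fuel with
  | zero =>
    intro G n hG hn
    exact ⟨G, hG, by omega, rfl⟩
  | succ fuel ih =>
    intro G n hG hn
    unfold pvLoopB
    by_cases h : ((pvBig G).length : Int) < n
    · rw [if_pos h]
      have hs : (pvBig G ++ pvNames.map (fun name => name ++ PySem.Int.toStr ((G : Int) + 1)))
          = pvBig (G + 1) := by
        rw [pvBig_succ, if_neg (by omega)]
      have hc : ((G : Int) + 1 + 1) = (((G + 1 : Nat) : Int) + 1) := by push_cast; ring
      rw [hs, hc]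
      obtain ⟨G', h1, h2, h3⟩ := ih (G + 1) n (by omega) (by push_cast at hn ⊢; omega)
      exact ⟨G', h1, h2, h3⟩
    · rw [if_neg h]
      rw [pvBig_length] at h
      exact ⟨G, hG, by push_cast at h ⊢; omega, rfl⟩

-- A's append loop, with A's exact step function
theorem pvA_fold : ∀ (l : List Int) (acc : List String),
    l.foldl (fun acc i =>
        if i < (pvNames.length : Int) then
          acc ++ [PySem.List.pyGetD pvNames i ""]
        else
          acc ++ [PySem.List.pyGetD pvNames (PySem.Int.mod i (pvNames.length : Int)) "" ++
            PySem.Int.toStr (PySem.Int.floordiv i (pvNames.length : Int) + 1)]) acc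
      = acc ++ l.map (fun i =>
          if i < (pvNames.length : Int) then
            PySem.List.pyGetD pvNames i ""
          else
            PySem.List.pyGetD pvNames (PySem.Int.mod i (pvNames.length : Int)) "" ++
              PySem.Int.toStr (PySem.Int.floordiv i (pvNames.length : Int) + 1)) := by
  intro l
  induction l with
  | nil => intro acc; simp
  | cons x l ih =>
    intro acc
    simp only [List.foldl_cons, List.map_cons]
    by_cases h : x < (pvNames.length : Int)
    · rw [if_pos h, ih, if_pos h, List.append_assoc]; rfl
    · rw [if_neg h, ih, if_neg h, List.append_assoc]; rfl

-- A's result is the flat map of pvG over range n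
theorem pvA_eq_map (n : Int) (hn : (78 : Int) < n) :
    generate_alphabetical_names n = (List.range n.toNat).map pvG := by
  unfold generate_alphabetical_names
  rw [if_pos (by rw [pvNames_length]; exact_mod_cast hn)]
  have hrange : PySem.List.pyRange 0 n 1 = (List.range n.toNat).map (fun k : Nat => (k : Int)) := by
    rw [PySem.List.pyRange_one]
    simp
  rw [hrange, pvA_fold, List.nil_append, List.map_map]
  have hmap : ∀ k ∈ List.range n.toNat,
      ((fun i => if i < (pvNames.length : Int) then PySem.List.pyGetD pvNames i ""
        else PySem.List.pyGetD pvNames (PySem.Int.mod i (pvNames.length : Int)) "" ++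
          PySem.Int.toStr (PySem.Int.floordiv i (pvNames.length : Int) + 1)) ∘
        (fun k : Nat => (k : Int))) k = pvG k := by
    intro k _
    simp only [Function.comp_apply, pvNames_length, pvG]
    by_cases hk : k < 78
    · rw [if_pos (by exact_mod_cast hk), if_pos hk, PySem.List.pyGetD_natCast]
    · rw [if_neg (by exact_mod_cast hk), if_neg hk,
        PySem.Int.mod_natCast, PySem.Int.floordiv_natCast, PySem.List.pyGetD_natCast]
  rw [List.map_congr_left hmap]
  have hlen : ((List.range n.toNat).map pvG).length = n.toNat := by simp
  calc PySem.List.slice ((List.range n.toNat).map pvG) none (some n)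
      = ((List.range n.toNat).map pvG).take n.toNat := PySem.List.slice_to _ (by omega)
    _ = (List.range n.toNat).map pvG := by rw [List.take_of_length_le (by rw [hlen])]

-- ===== VERDICT (by name: the statement is the Claim_ definition above) =====
theorem generate_alphabetical_names_spec : Claim_equal_generate_alphabetical_names := by
  unfold Claim_equal_generate_alphabetical_names
  intro n _
  unfold Spec_generate_alphabetical_names
  by_cases h : n ≤ (pvNames.length : Int)
  · unfold generate_alphabetical_names generate_alphabetical_names_alt
    rw [if_neg (by omega), if_pos h]
  · push_neg at h
    rw [pvNames_length] at h
    have h78 : (78 : Int) < n := by exact_mod_cast h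
    rw [pvA_eq_map n h78]
    unfold generate_alphabetical_names_alt
    rw [if_neg (by rw [pvNames_length]; push_neg; exact_mod_cast h)]
    have hb1 : pvNames = pvBig 1 := rfl
    have h2 : (((1 : Nat) : Int) + 1) = 2 := by norm_num
    obtain ⟨G', hG1, hGn, hEq⟩ := pvLoopB_spec n.toNat 1 n (le_refl 1) (by omega)
    rw [hb1, ← h2, hEq, pvBig_eq_map]
    have hle : n.toNat ≤ 78 * G' := by omega
    rw [PySem.List.slice_to _ (by omega : (0 : Int) ≤ n), ← List.map_take, List.take_range,
      Nat.min_eq_left hle]
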